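-- pv_equiv track=rewrite | github.com/bubbafett5611/Bubba_Nodes | src/bubba_nodes/nodes/prompt.py | _dedupe_tokens
-- ===== SOURCE A (Python) =====
-- def _dedupe_tokens(items: list[str]) -> list[str]:
--     seen = set()
--     output = []
--     for item in items:
--         key = item.lower()
--         if key in seen:
--             continue
--         seen.add(key)
--         output.append(item)
--     return output
-- ===== SOURCE B (Python) =====
-- def _dedupe_tokens(items: list[str]) -> list[str]:
--     if not items:
--         return []
--     head = items[0]
--     key = head.lower()
--     rest = [x for x in items[1:] if x.lower() != key]
--     return [head] + _dedupe_tokens(rest)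
-- ===== Notes on version B (the rewrite author's own statement) =====
-- stated objective: alternative
-- what changed: Replaces the single pass maintaining a seen-set and output list by a recursive select-and-filter scheme: keep the head, delete every later string with the same lowercase form, and recurse on the shrunken remainder, so no auxiliary seen structure exists at all.
import Mathlib
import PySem

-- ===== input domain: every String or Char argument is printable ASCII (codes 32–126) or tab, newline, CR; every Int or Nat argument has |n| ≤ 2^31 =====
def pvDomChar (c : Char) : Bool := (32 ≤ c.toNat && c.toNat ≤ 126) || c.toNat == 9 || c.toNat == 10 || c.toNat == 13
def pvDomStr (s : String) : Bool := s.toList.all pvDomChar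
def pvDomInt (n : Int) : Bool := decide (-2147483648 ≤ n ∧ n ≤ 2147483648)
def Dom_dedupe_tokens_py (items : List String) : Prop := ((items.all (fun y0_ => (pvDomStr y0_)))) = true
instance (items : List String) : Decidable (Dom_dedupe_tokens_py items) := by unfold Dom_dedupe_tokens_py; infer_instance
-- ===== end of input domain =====

-- B dedupes by recursive select-and-filter (keep head, drop later same-lowercase strings, recurse) instead of A's single pass with a seen-set; return value only.

-- ===== PORT A =====
def dedupe_tokens_py (items : List String) : List String :=
  (items.foldl
    (fun (st : PySem.Set String × List String) item =>
      let key := PySem.Str.lower item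
      if PySem.Set.contains st.1 key then st
      else (PySem.Set.add st.1 key, st.2 ++ [item]))
    (PySem.Set.empty, [])).2

-- ===== PORT B =====
def dedupe_tokens_py_alt : List String → List String
  | [] => []
  | head :: tail =>
    let key := PySem.Str.lower head
    head :: dedupe_tokens_py_alt (tail.filter (fun x => PySem.Str.lower x != key))
termination_by items => items.length
decreasing_by
  simpa using Nat.lt_succ_of_le (List.length_filter_le _ tail)

-- ===== PRECONDITION & SPEC =====
def Spec_dedupe_tokens_py (items : List String) (out : List String) : Prop := out = dedupe_tokens_py_alt items
instance (items : List String) (out : List String) : Decidable (Spec_dedupe_tokens_py items out) := by unfold Spec_dedupe_tokens_py; infer_instance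

-- ===== CLAIM (what is proved, stated in full; the proofs are below) =====
def Claim_equal_dedupe_tokens_py : Prop := ∀ (items : List String), Dom_dedupe_tokens_py items → Spec_dedupe_tokens_py items (dedupe_tokens_py items)

-- ===== LEMMAS AND PROOFS =====

-- Loop invariant: running A's fold from state (seen, out) yields out ++ B's dedup of the
-- items whose lowercase key is not already in seen.
theorem dedupe_inv (items : List String) :
    ∀ (seen : PySem.Set String) (out : List String),
      (items.foldl
        (fun (st : PySem.Set String × List String) item =>
          let key := PySem.Str.lower item
          if PySem.Set.contains st.1 key then st
          else (PySem.Set.add st.1 key, st.2 ++ [item]))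
        (seen, out)).2
      = out ++ dedupe_tokens_py_alt
          (items.filter (fun x => !(PySem.Set.contains seen (PySem.Str.lower x)))) := by
  induction items with
  | nil => intro seen out; simp [dedupe_tokens_py_alt]
  | cons x xs ih =>
    intro seen out
    simp only [List.foldl]
    by_cases hc : PySem.Set.contains seen (PySem.Str.lower x) = true
    · simp only [hc, if_true]
      rw [ih seen out]
      congr 2
      rw [List.filter_cons_of_neg (by simp [(PySem.Set.contains_iff _ _).mp hc])]
    · have hcf : PySem.Set.contains seen (PySem.Str.lower x) = false := by
        cases h : PySem.Set.contains seen (PySem.Str.lower x) <;> simp_all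
      simp only [hcf, Bool.false_eq_true, if_false]
      rw [ih (PySem.Set.add seen (PySem.Str.lower x)) (out ++ [x])]
      rw [List.filter_cons_of_pos (by simp [PySem.Set.contains_eq_listContains] at hcf ⊢; simp [hcf])]
      rw [List.append_assoc]
      congr 1
      show _ = dedupe_tokens_py_alt (x :: _)
      rw [dedupe_tokens_py_alt]
      simp only [List.singleton_append, List.cons.injEq, true_and]
      congr 1
      rw [List.filter_filter]
      apply List.filter_congr
      intro y _
      have hadd : PySem.Set.add seen (PySem.Str.lower x) = seen ++ [PySem.Str.lower x] := by
        simp only [PySem.Set.add, hcf, Bool.false_eq_true, if_false]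
      rw [hadd]
      simp only [PySem.Set.contains_eq_listContains, List.contains_append,
        List.contains_cons, List.contains_nil, Bool.or_false, Bool.not_or, bne]
      rw [Bool.and_comm, BEq.comm]

theorem dedupe_tokens_py_eq (items : List String) :
    dedupe_tokens_py items = dedupe_tokens_py_alt items := by
  unfold dedupe_tokens_py
  have := dedupe_inv items PySem.Set.empty []
  simpa [PySem.Set.empty] using this

-- ===== VERDICT (by name: the statement is the Claim_ definition above) =====
theorem dedupe_tokens_py_spec : Claim_equal_dedupe_tokens_py := by
  intro items _
  unfold Spec_dedupe_tokens_py
  exact dedupe_tokens_py_eq items
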